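-- pv_equiv track=rewrite | github.com/JoahanC/MCMC_TPM | best_fits/helpers.py | determine_crater_fraction
-- ===== SOURCE A (Python) =====
-- def determine_crater_fraction(line):
--     """
--     Returns all of the information regarding the best crater fraction solution.
--
--     Parameters
--     ----------
--
--     line : str
--         The line containing all the crater fraction information.
--
--     """
--     fraction = ""
--     fraction_pos_sigma = ""
--     fraction_neg_sigma = ""
--     index = 0
--     while True:
--         if line[index] == '+':
--             fraction = fraction.strip()[17:]
--             break
--         fraction += line[index]
--         index += 1
--     while True:
--         if fraction_pos_sigma == '+':
--             fraction_pos_sigma = ""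
--         if line[index] == '-':
--             fraction_pos_sigma = fraction_pos_sigma.strip()
--             break
--         fraction_pos_sigma += line[index]
--         index += 1
--     while index < len(line):
--         if fraction_neg_sigma == '-':
--             fraction_neg_sigma = ""
--         fraction_neg_sigma += line[index]
--         index += 1
--     outputs = [fraction, fraction_pos_sigma, fraction_neg_sigma.strip()]
--     return outputs
-- ===== SOURCE B (Python) =====
-- def determine_crater_fraction(line):
--     plus = line.index('+')
--     minus = line.index('-', plus + 1)
--     fraction = line[:plus].strip()[17:]
--     pos_sigma = line[plus + 1:minus].lstrip('+').strip()
--     neg_sigma = line[minus:].lstrip('-').strip()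
--     return [fraction, pos_sigma, neg_sigma]
-- ===== Notes on version B (the rewrite author's own statement) =====
-- stated objective: idiomatic
-- what changed: A's three character-accumulation while-loops with reset sentinels are replaced by locating the '+' and the following '-' once with str.index and slicing/stripping the three fields directly.
-- intended difference: On lines where everything from the first '-' after the first '+' to the end of the line is '-', A's leftover loop state returns '-' as the third field while B returns the stripped empty field '', which is the intended value. — e.g. on determine_crater_fraction("a+1-"): A returns ["", "1", "-"], B returns ["", "1", ""]
-- outside the precondition, e.g. on determine_crater_fraction('+'): A raises IndexError, B raises ValueError; on determine_crater_fraction('-'): A raises IndexError, B raises ValueError; on determine_crater_fraction(''): A raises IndexError, B raises ValueError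
import Mathlib
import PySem

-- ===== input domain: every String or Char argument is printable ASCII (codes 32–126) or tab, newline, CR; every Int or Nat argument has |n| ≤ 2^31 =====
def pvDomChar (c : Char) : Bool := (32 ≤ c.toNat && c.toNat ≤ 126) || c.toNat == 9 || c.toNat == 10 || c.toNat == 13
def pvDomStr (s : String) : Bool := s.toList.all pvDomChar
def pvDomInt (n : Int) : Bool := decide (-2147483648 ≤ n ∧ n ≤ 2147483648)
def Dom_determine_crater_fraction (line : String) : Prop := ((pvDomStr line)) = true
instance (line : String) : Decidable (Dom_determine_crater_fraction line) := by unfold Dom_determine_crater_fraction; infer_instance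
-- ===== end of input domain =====

-- B replaces A's three character-accumulation while-loops by locating the two delimiters once and slicing (idiomatic).
-- Where A's leftover loop state makes it return "-" as the third field (tail after the first '-' is all '-'), B returns "" — stated as D_ below.

-- ===== PORT A =====
-- first while-loop of A: scan to '+' accumulating `fraction`; none = IndexError
def dcfLoop1 : List Char → List Char → Option (List Char × List Char)
  | [], _ => none
  | c :: rest, acc =>
    if c = '+' then some ((PySem.Chars.strip acc).drop 17, c :: rest)
    else dcfLoop1 rest (acc ++ [c])

-- second while-loop of A: reset when acc == "+", break at '-'; none = IndexError
def dcfLoop2 : List Char → List Char → Option (List Char × List Char)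
  | [], _ => none
  | c :: rest, acc =>
    let acc' := if acc = ['+'] then [] else acc
    if c = '-' then some (PySem.Chars.strip acc', c :: rest)
    else dcfLoop2 rest (acc' ++ [c])

-- third while-loop of A: reset when acc == "-", run to end of line
def dcfLoop3 : List Char → List Char → List Char
  | [], acc => acc
  | c :: rest, acc =>
    let acc' := if acc = ['-'] then [] else acc
    dcfLoop3 rest (acc' ++ [c])

def determine_crater_fraction (line : String) : List String :=
  match dcfLoop1 line.toList [] with
  | none => []          -- IndexError (excluded by Pre_)
  | some (frac, rest1) =>
    match dcfLoop2 rest1 [] with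
    | none => []        -- IndexError (excluded by Pre_)
    | some (pos, rest2) =>
      [String.ofList frac, String.ofList pos, String.ofList (PySem.Chars.strip (dcfLoop3 rest2 []))]

-- ===== PORT B =====
-- Source B: plus = line.index('+'); minus = line.index('-', plus+1); three slices.
-- line.index('-', plus+1) is ported relative to the remaining suffix: minus = plus+1+k (exact).
-- .lstrip('+') / .lstrip('-') are ported by hand as dropWhile on the char list (exact: left strip of one explicit char).
def determine_crater_fraction_alt (line : String) : List String :=
  let l := line.toList
  match PySem.List.index? l '+' with
  | none => []          -- ValueError
  | some plus =>
    match PySem.List.index? (l.drop (plus + 1)) '-' with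
    | none => []        -- ValueError
    | some k =>
      let fraction := (PySem.Chars.strip (l.take plus)).drop 17
      let pos := PySem.Chars.strip (((l.drop (plus + 1)).take k).dropWhile (· == '+'))
      let neg := PySem.Chars.strip (((l.drop (plus + 1)).drop k).dropWhile (· == '-'))
      [String.ofList fraction, String.ofList pos, String.ofList neg]

-- ===== PRECONDITION & SPEC =====
-- Pre_ excludes exactly the inputs where A raises IndexError: lines with no '+', or with no '-' after the first '+'.
def Pre_determine_crater_fraction (line : String) : Prop :=
  '+' ∈ line.toList ∧ '-' ∈ (line.toList.dropWhile (· != '+')).tail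
instance (line : String) : Decidable (Pre_determine_crater_fraction line) := by
  unfold Pre_determine_crater_fraction; infer_instance

def pvWitness_determine_crater_fraction : String := "a+1-2"

-- On lines where everything from the first '-' after the first '+' to the end is '-', A's leftover loop state
-- returns "-" as the third field while B returns "" (the stripped-empty field), which is the intended value.
def D_determine_crater_fraction (line : String) : Prop :=
  Pre_determine_crater_fraction line ∧
    (((line.toList.dropWhile (· != '+')).tail).dropWhile (· != '-')).all (· == '-') = true
instance (line : String) : Decidable (D_determine_crater_fraction line) := by
  unfold D_determine_crater_fraction; infer_instance

def Spec_determine_crater_fraction (line : String) (out : List String) : Prop :=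
  ¬ D_determine_crater_fraction line → out = determine_crater_fraction_alt line
instance (line : String) (out : List String) : Decidable (Spec_determine_crater_fraction line out) := by
  unfold Spec_determine_crater_fraction; infer_instance

def pvDiffWitness_determine_crater_fraction : String := "a+1-"
def pvDiffWitnessOut_determine_crater_fraction : (List String) × (List String) :=
  (["", "1", "-"], ["", "1", ""])

-- ===== CLAIM (what is proved, stated in full; the proofs are below) =====
def Claim_unchanged_determine_crater_fraction : Prop := ∀ (line : String), Dom_determine_crater_fraction line → Pre_determine_crater_fraction line → Spec_determine_crater_fraction line (determine_crater_fraction line)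
def Claim_changed_determine_crater_fraction : Prop := Dom_determine_crater_fraction (pvDiffWitness_determine_crater_fraction) ∧ Pre_determine_crater_fraction (pvDiffWitness_determine_crater_fraction) ∧ D_determine_crater_fraction (pvDiffWitness_determine_crater_fraction) ∧ determine_crater_fraction (pvDiffWitness_determine_crater_fraction) = pvDiffWitnessOut_determine_crater_fraction.1 ∧ determine_crater_fraction_alt (pvDiffWitness_determine_crater_fraction) = pvDiffWitnessOut_determine_crater_fraction.2 ∧ pvDiffWitnessOut_determine_crater_fraction.1 ≠ pvDiffWitnessOut_determine_crater_fraction.2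
def Claim_exact_determine_crater_fraction : Prop := ∀ (line : String), Dom_determine_crater_fraction line → Pre_determine_crater_fraction line → D_determine_crater_fraction line → determine_crater_fraction line ≠ determine_crater_fraction_alt line

-- ===== LEMMAS AND PROOFS =====

-- canonical pieces both ports are reduced to
def dcfT (l : List Char) : List Char := (l.dropWhile (· != '+')).tail
def dcfFrac (l : List Char) : List Char := (PySem.Chars.strip (l.takeWhile (· != '+'))).drop 17
def dcfPos (l : List Char) : List Char :=
  PySem.Chars.strip (((dcfT l).takeWhile (· != '-')).dropWhile (· == '+'))
def dcfSeg (l : List Char) : List Char := (dcfT l).dropWhile (· != '-')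

lemma dcfMemTail {a c : Char} {rest : List Char} (h : a ∈ c :: rest) (hc : ¬ c = a) :
    a ∈ rest := by
  rcases List.mem_cons.mp h with h | h
  · exact absurd h.symm hc
  · exact h

lemma dropWhile_ne_cons {a : Char} {l : List Char} (h : a ∈ l) :
    ∃ t, l.dropWhile (· != a) = a :: t := by
  induction l with
  | nil => cases h
  | cons c rest ih =>
    by_cases hc : c = a
    · exact ⟨rest, by simp [hc]⟩
    · rcases ih (dcfMemTail h hc) with ⟨t, ht⟩
      refine ⟨t, ?_⟩
      rw [List.dropWhile_cons]
      simp [hc, ht]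

lemma dcfLoop1_eq (l acc : List Char) (h : '+' ∈ l) :
    dcfLoop1 l acc =
      some ((PySem.Chars.strip (acc ++ l.takeWhile (· != '+'))).drop 17,
            l.dropWhile (· != '+')) := by
  induction l generalizing acc with
  | nil => cases h
  | cons c rest ih =>
    by_cases hc : c = '+'
    · subst hc; simp [dcfLoop1]
    · have hm : '+' ∈ rest := dcfMemTail h hc
      simp [dcfLoop1, hc, ih _ hm]

lemma dcfLoop2_acc (l acc : List Char) (h : '-' ∈ l) (h0 : acc ≠ []) (h1 : acc ≠ ['+']) :
    dcfLoop2 l acc =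
      some (PySem.Chars.strip (acc ++ l.takeWhile (· != '-')), l.dropWhile (· != '-')) := by
  induction l generalizing acc with
  | nil => cases h
  | cons c rest ih =>
    by_cases hc : c = '-'
    · subst hc; simp [dcfLoop2, h1]
    · have hm : '-' ∈ rest := dcfMemTail h hc
      have hne : acc ++ [c] ≠ [] := by simp
      have hne1 : acc ++ [c] ≠ ['+'] := by
        intro hx
        have hlen := congrArg List.length hx
        simp at hlen
        exact h0 hlen
      simp [dcfLoop2, hc, h1, ih _ hm hne hne1]

lemma dcfLoop2_plus (l : List Char) (h : '-' ∈ l) :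
    dcfLoop2 l ['+'] =
      some (PySem.Chars.strip ((l.takeWhile (· != '-')).dropWhile (· == '+')),
            l.dropWhile (· != '-')) := by
  induction l with
  | nil => cases h
  | cons c rest ih =>
    by_cases hc : c = '-'
    · subst hc; simp [dcfLoop2]
    · have hm : '-' ∈ rest := dcfMemTail h hc
      by_cases hp : c = '+'
      · subst hp; simp [dcfLoop2, hc, ih hm]
      · simp [dcfLoop2, hc, hp, dcfLoop2_acc rest [c] hm (by simp) (by simp [hp]),
          ]

lemma dcfLoop3_acc (l acc : List Char) (h0 : acc ≠ []) (h1 : acc ≠ ['-']) :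
    dcfLoop3 l acc = acc ++ l := by
  induction l generalizing acc with
  | nil => simp [dcfLoop3]
  | cons c rest ih =>
    have hne : acc ++ [c] ≠ [] := by simp
    have hne1 : acc ++ [c] ≠ ['-'] := by
      intro hx
      have hlen := congrArg List.length hx
      simp at hlen
      exact h0 hlen
    simp [dcfLoop3, h1, ih _ hne hne1]

lemma dcfLoop3_minus (l : List Char) (hne : l ≠ []) :
    dcfLoop3 l ['-'] = dcfLoop3 l [] := by
  cases l with
  | nil => exact absurd rfl hne
  | cons c rest => simp [dcfLoop3]

lemma dcfLoop3_nil_of_exists (l : List Char) (h : ∃ c ∈ l, c ≠ '-') :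
    dcfLoop3 l [] = l.dropWhile (· == '-') := by
  induction l with
  | nil => rcases h with ⟨c, hc, _⟩; cases hc
  | cons c rest ih =>
    by_cases hc : c = '-'
    · subst hc
      have hr : ∃ d ∈ rest, d ≠ '-' := by
        rcases h with ⟨d, hd, hdne⟩
        rcases List.mem_cons.mp hd with hd | hd
        · exact absurd hd hdne
        · exact ⟨d, hd, hdne⟩
      have hrne : rest ≠ [] := by rcases hr with ⟨d, hd, _⟩; exact List.ne_nil_of_mem hd
      simp [dcfLoop3, dcfLoop3_minus rest hrne, ih hr]
    · simp [dcfLoop3, dcfLoop3_acc rest [c] (by simp) (by simp [hc]), hc]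

lemma dcfLoop3_nil_of_all (l : List Char) (hne : l ≠ []) (h : ∀ c ∈ l, c = '-') :
    dcfLoop3 l [] = ['-'] := by
  induction l with
  | nil => exact absurd rfl hne
  | cons c rest ih =>
    have hc : c = '-' := h c (by simp)
    subst hc
    cases rest with
    | nil => simp [dcfLoop3]
    | cons d rest' =>
      rw [show dcfLoop3 ('-' :: d :: rest') [] = dcfLoop3 (d :: rest') ['-'] by simp [dcfLoop3],
        dcfLoop3_minus _ (by simp)]
      exact ih (by simp) (fun x hx => h x (by simp [hx]))

lemma index_take_drop (a : Char) (l : List Char) (h : a ∈ l) :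
    PySem.List.index? l a = some (l.takeWhile (· != a)).length ∧
      l.drop ((l.takeWhile (· != a)).length + 1) = (l.dropWhile (· != a)).tail ∧
      l.take (l.takeWhile (· != a)).length = l.takeWhile (· != a) ∧
      l.drop (l.takeWhile (· != a)).length = l.dropWhile (· != a) := by
  induction l with
  | nil => cases h
  | cons c rest ih =>
    by_cases hc : c = a
    · subst hc
      refine ⟨by rw [PySem.List.index?_cons_self]; simp [], ?_, ?_, ?_⟩ <;>
        simp []
    · have hm : a ∈ rest := dcfMemTail h hc
      obtain ⟨i1, i2, i3, i4⟩ := ih hm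
      refine ⟨?_, ?_, ?_, ?_⟩
      · rw [PySem.List.index?_cons_of_ne rest hc, i1]
        simp [hc]
      · simpa [List.takeWhile_cons, List.dropWhile_cons, hc] using i2
      · simpa [List.takeWhile_cons, List.dropWhile_cons, hc] using i3
      · simpa [List.takeWhile_cons, List.dropWhile_cons, hc] using i4

lemma determine_crater_fraction_eq (line : String)
    (h : Pre_determine_crater_fraction line) :
    determine_crater_fraction line =
      [String.ofList (dcfFrac line.toList), String.ofList (dcfPos line.toList),
       String.ofList (PySem.Chars.strip (dcfLoop3 (dcfSeg line.toList) []))] := by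
  obtain ⟨h1, h2⟩ := h
  set l := line.toList with hl
  obtain ⟨t, ht⟩ := dropWhile_ne_cons h1
  have h2t : '-' ∈ t := by simpa [ht] using h2
  have hstep : dcfLoop2 ('+' :: t) [] = dcfLoop2 t ['+'] := by
    simp [dcfLoop2]
  unfold determine_crater_fraction
  rw [← hl]
  simp only [dcfLoop1_eq l [] h1, ht, hstep, dcfLoop2_plus t h2t]
  simp [dcfFrac, dcfPos, dcfSeg, dcfT, ht]

lemma determine_crater_fraction_alt_eq (line : String)
    (h : Pre_determine_crater_fraction line) :
    determine_crater_fraction_alt line =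
      [String.ofList (dcfFrac line.toList), String.ofList (dcfPos line.toList),
       String.ofList (PySem.Chars.strip ((dcfSeg line.toList).dropWhile (· == '-')))] := by
  obtain ⟨h1, h2⟩ := h
  set l := line.toList with hl
  obtain ⟨i1, i2, i3, i4⟩ := index_take_drop '+' l h1
  obtain ⟨j1, j2, j3, j4⟩ := index_take_drop '-' _ h2
  unfold determine_crater_fraction_alt
  rw [← hl]
  simp only [i1, i2, j1, i3, j3, j4]
  simp only [dcfFrac, dcfPos, dcfSeg, dcfT]

lemma seg_cons (line : String) (h : Pre_determine_crater_fraction line) :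
    ∃ u, dcfSeg line.toList = '-' :: u := by
  obtain ⟨h1, h2⟩ := h
  exact dropWhile_ne_cons h2

-- ===== VERDICT (by name: the statement is the Claim_ definition above) =====
theorem determine_crater_fraction_spec : Claim_unchanged_determine_crater_fraction := by
  intro line _ hPre hnD
  rw [determine_crater_fraction_eq line hPre, determine_crater_fraction_alt_eq line hPre]
  have hex : ∃ c ∈ dcfSeg line.toList, c ≠ '-' := by
    by_contra hall
    refine hnD ⟨hPre, List.all_eq_true.mpr ?_⟩
    intro c hc
    by_contra hne
    exact hall ⟨c, hc, by simpa using hne⟩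
  rw [dcfLoop3_nil_of_exists _ hex]

set_option maxRecDepth 8192 in
theorem determine_crater_fraction_changed : Claim_changed_determine_crater_fraction := by
  unfold Claim_changed_determine_crater_fraction
  refine ⟨?_, ?_, ?_, ?_, ?_, ?_⟩
  · decide
  · decide
  · decide
  · decide
  · decide
  · decide

theorem determine_crater_fraction_tight : Claim_exact_determine_crater_fraction := by
  intro line _ hPre hD heq
  obtain ⟨_, hallb⟩ := hD
  have hall : ∀ c ∈ dcfSeg line.toList, c = '-' := fun c hc => by
    simpa using List.all_eq_true.mp hallb c hc
  obtain ⟨u, hu⟩ := seg_cons line hPre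
  rw [determine_crater_fraction_eq line hPre, determine_crater_fraction_alt_eq line hPre] at heq
  simp only [List.cons.injEq, and_true] at heq
  obtain ⟨-, -, h3⟩ := heq
  rw [dcfLoop3_nil_of_all (dcfSeg line.toList) (by simp [hu]) hall,
    (List.dropWhile_eq_nil_iff (l := dcfSeg line.toList) (p := fun x => x == '-')).mpr
      (by intro x hx; simpa using hall x hx)] at h3
  exact absurd h3 (by decide)
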